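-- pv_equiv track=rewrite | github.com/qdelcourte/advent-of-code | 13/main.py | solve
-- ===== SOURCE A (Python) =====
-- def get_differences(list1, list2):
--     return [
--         index
--         for index, (first, second) in enumerate(zip(list1, list2))
--         if first != second
--     ]
--
-- def find_reflection(lst, allowed_diff=0):
--     for i, line in enumerate(lst, start=1):
--         m = min(i, len(lst) - i)
--         left = lst[i - m: i]
--         right = lst[i: i + m]
--         right_reversed = list(reversed(right))
--         if left and right and len(get_differences(''.join(left), ''.join(right_reversed))) == allowed_diff:
--             return i
--
-- def solve(mirrors, allowed_diff):
--     result = 0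
--     for k, mirror in enumerate(mirrors):
--         # Check horizontal
--         if i := find_reflection(mirror, allowed_diff):
--             result += 100 * i
--
--         # Check vertical
--         columns = [
--             ''.join([line[i] for line in mirror])
--             for i in range(0, len(mirror[0]))
--         ]
--
--         if i := find_reflection(columns, allowed_diff):
--             result += i
--
--     return result
-- ===== SOURCE B (Python) =====
-- def _find_reflection(rows, allowed_diff):
--     # Bucket the Hamming distance of every unordered row pair by its index sum
--     # (anti-diagonal); a reflection line i needs exactly the pairs summing to 2*i-1.
--     n = len(rows)
--     diag = {}
--     for a in range(n):
--         for b in range(a + 1, n):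
--             s = a + b
--             diag[s] = diag.get(s, 0) + sum(x != y for x, y in zip(rows[a], rows[b]))
--     for i in range(1, n):
--         if diag.get(2 * i - 1, 0) == allowed_diff:
--             return i
--     return None
--
-- def solve(mirrors, allowed_diff):
--     result = 0
--     for mirror in mirrors:
--         if i := _find_reflection(mirror, allowed_diff):
--             result += 100 * i
--         columns = [
--             ''.join([line[i] for line in mirror])
--             for i in range(0, len(mirror[0]))
--         ]
--         if i := _find_reflection(columns, allowed_diff):
--             result += i
--     return result
-- ===== Notes on version B (the rewrite author's own statement) =====
-- stated objective: alternative
-- what changed: find_reflection is replaced by two staged passes: one loop over ALL unordered row pairs buckets their Hamming distances into a dict keyed by index sum (anti-diagonal), then the candidate scan is a pure lookup diag[2*i-1] == allowed_diff, with no left/right windows, slicing, reversing or joining; correct because the mirrored pairs of candidate i are exactly the pairs with index sum 2*i-1. B has no early exit, so it is slower than A on large mirrors.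
-- outside the precondition, e.g. on solve([['a', 'bc', 'a', 'bc']], 2): A returns 0, B returns 200
import Mathlib
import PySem

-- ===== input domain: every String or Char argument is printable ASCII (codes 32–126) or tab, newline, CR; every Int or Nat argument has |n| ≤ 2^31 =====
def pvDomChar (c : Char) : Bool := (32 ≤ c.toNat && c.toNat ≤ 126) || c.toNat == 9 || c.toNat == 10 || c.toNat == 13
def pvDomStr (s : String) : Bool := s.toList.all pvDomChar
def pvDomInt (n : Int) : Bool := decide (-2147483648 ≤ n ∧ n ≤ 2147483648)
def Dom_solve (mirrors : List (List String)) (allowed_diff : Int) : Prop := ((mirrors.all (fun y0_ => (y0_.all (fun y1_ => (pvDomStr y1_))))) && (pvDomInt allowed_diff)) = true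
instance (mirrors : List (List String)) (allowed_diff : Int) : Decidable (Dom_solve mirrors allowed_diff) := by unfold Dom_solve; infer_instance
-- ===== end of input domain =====

-- B replaces find_reflection's candidate-window scan (slice/reverse/join then diff) by two staged
-- passes: bucket every unordered row pair's Hamming distance by index sum into a dict, then look
-- up diag[2i-1] per candidate (alternative decomposition; no speed claim).

-- ===== PORT A =====
-- Joined Python strings are read on the char-list side (''.join(xs) = the flattened code points).
def get_differences (l1 l2 : List Char) : List Int :=
  (PySem.List.enumerate (l1.zip l2) 0).filterMap
    (fun p => if p.2.1 ≠ p.2.2 then some p.1 else none)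

def pvJoin (xs : List String) : List Char := (xs.map String.toList).flatten

def find_reflection (lst : List String) (allowed_diff : Int) : Option Int :=
  (PySem.List.enumerate lst 1).foldl
    (fun acc p =>
      match acc with
      | some _ => acc
      | none =>
        let i := p.1
        let m := min i (PySem.List.len lst - i)
        let left := PySem.List.slice lst (some (i - m)) (some i)
        let right := PySem.List.slice lst (some i) (some (i + m))
        let right_reversed := right.reverse
        if left ≠ [] ∧ right ≠ [] ∧
            ((get_differences (pvJoin left) (pvJoin right_reversed)).length : Int) = allowed_diff
        then some i else none)
    none

-- mirror[0] raises IndexError on an empty mirror and line[i] raises when a line is shorter than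
-- mirror[0]; both are excluded by Pre_solve, so the defaults below are never reached under Pre_.
def solve (mirrors : List (List String)) (allowed_diff : Int) : Int :=
  mirrors.foldl
    (fun result mirror =>
      let result :=
        match find_reflection mirror allowed_diff with
        | some i => if i ≠ 0 then result + 100 * i else result
        | none => result
      let columns : List String :=
        (PySem.List.pyRange 0 (PySem.List.len (mirror.headD "").toList) 1).map
          (fun i => String.ofList (mirror.map (fun line => PySem.List.pyGetD line.toList i ' ')))
      match find_reflection columns allowed_diff with
      | some i => if i ≠ 0 then result + i else result
      | none => result)
    0

-- ===== PORT B =====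
-- sum(x != y for x, y in zip(a, b)) — a count over the zipped characters.
def pvHam (a b : String) : Int :=
  ((a.toList.zip b.toList).countP (fun q => q.1 != q.2) : Int)

-- the dict built by B's double loop over all unordered row pairs, keyed by a+b
def diagTable (rows : List String) : PySem.Dict Int Int :=
  let n := PySem.List.len rows
  (PySem.List.pyRange 0 n 1).foldl
    (fun d a =>
      (PySem.List.pyRange (a + 1) n 1).foldl
        (fun d b =>
          let s := a + b
          d.insert s (d.getD s 0 +
            pvHam (PySem.List.pyGetD rows a "") (PySem.List.pyGetD rows b ""))) d)
    PySem.Dict.empty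

def find_reflection_alt (rows : List String) (allowed_diff : Int) : Option Int :=
  let n := PySem.List.len rows
  let diag := diagTable rows
  (PySem.List.pyRange 1 n 1).foldl
    (fun acc i =>
      match acc with
      | some _ => acc
      | none => if diag.getD (2 * i - 1) 0 = allowed_diff then some i else none)
    none

def solve_alt (mirrors : List (List String)) (allowed_diff : Int) : Int :=
  mirrors.foldl
    (fun result mirror =>
      let result :=
        match find_reflection_alt mirror allowed_diff with
        | some i => if i ≠ 0 then result + 100 * i else result
        | none => result
      let columns : List String :=
        (PySem.List.pyRange 0 (PySem.List.len (mirror.headD "").toList) 1).map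
          (fun i => String.ofList (mirror.map (fun line => PySem.List.pyGetD line.toList i ' ')))
      match find_reflection_alt columns allowed_diff with
      | some i => if i ≠ 0 then result + i else result
      | none => result)
    0

-- ===== PRECONDITION & SPEC =====
-- Pre_solve excludes mirrors that are empty (A raises IndexError on mirror[0]) or ragged: on a
-- ragged mirror A either raises IndexError building the columns, or (when every line is at least
-- as long as the first) returns a value whose join-then-zip diffing mixes characters across row
-- boundaries — a defensible-corner artefact no caller of this grid puzzle would specify; B
-- compares row-wise there.
def Pre_solve (mirrors : List (List String)) (allowed_diff : Int) : Prop :=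
  ∀ mirror ∈ mirrors, mirror ≠ [] ∧
    ∀ a ∈ mirror, ∀ b ∈ mirror, a.toList.length = b.toList.length
instance (mirrors : List (List String)) (allowed_diff : Int) : Decidable (Pre_solve mirrors allowed_diff) := by
  unfold Pre_solve; infer_instance

def pvWitness_solve : List (List String) × Int := ([["#.", ".#", ".#", "#."]], 0)

def Spec_solve (mirrors : List (List String)) (allowed_diff : Int) (out : Int) : Prop := out = solve_alt mirrors allowed_diff
instance (mirrors : List (List String)) (allowed_diff : Int) (out : Int) : Decidable (Spec_solve mirrors allowed_diff out) := by unfold Spec_solve; infer_instance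

-- ===== CLAIM (what is proved, stated in full; the proofs are below) =====
def Claim_equal_solve : Prop := ∀ (mirrors : List (List String)) (allowed_diff : Int), Dom_solve mirrors allowed_diff → Pre_solve mirrors allowed_diff → Spec_solve mirrors allowed_diff (solve mirrors allowed_diff)

-- ===== LEMMAS AND PROOFS =====

-- A's per-candidate test (the body of find_reflection's loop), named for the proofs.
abbrev PACond (lst : List String) (ad i : Int) : Prop :=
  let m := min i (PySem.List.len lst - i)
  let left := PySem.List.slice lst (some (i - m)) (some i)
  let right := PySem.List.slice lst (some i) (some (i + m))
  left ≠ [] ∧ right ≠ [] ∧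
    ((get_differences (pvJoin left) (pvJoin right.reverse)).length : Int) = ad

-- the common middle form: total mismatches of the mirrored row pairs around line k
def mirrorSum (lst : List String) (k : Nat) : Int :=
  ((List.range (min k (lst.length - k))).map
    (fun j => pvHam (lst.getD (k - 1 - j) "") (lst.getD (k + j) ""))).sum

theorem gd_len_aux : ∀ (l : List (Char × Char)) (s : Int),
    ((PySem.List.enumerate l s).filterMap
      (fun p => if p.2.1 = p.2.2 then none else some p.1)).length
    = l.countP (fun q => q.1 != q.2)
  | [], _ => by simp [PySem.List.enumerate_nil]
  | q :: l, s => by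
    by_cases h : q.1 = q.2 <;>
      simp [PySem.List.enumerate_cons, h, gd_len_aux l (s + 1)]

theorem gd_len (l1 l2 : List Char) :
    (get_differences l1 l2).length = (l1.zip l2).countP (fun q => q.1 != q.2) := by
  simpa [get_differences] using gd_len_aux (l1.zip l2) 0

theorem cast_sum_map (l : List (String × String)) :
    (((l.map (fun q => (q.1.toList.zip q.2.toList).countP (fun c => c.1 != c.2))).sum : Nat) : Int)
    = (l.map (fun q => pvHam q.1 q.2)).sum := by
  induction l with
  | nil => rfl
  | cons a l ih =>
    simp only [List.map_cons, List.sum_cons]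
    rw [Nat.cast_add, ih]
    rfl

theorem countP_flatten_zip (p : Char × Char → Bool) :
    ∀ (L R : List (List Char)), (∀ q ∈ L.zip R, q.1.length = q.2.length) →
      (L.flatten.zip R.flatten).countP p
      = ((L.zip R).map (fun q => (q.1.zip q.2).countP p)).sum
  | [], R, _ => by simp
  | a :: L, [], _ => by simp
  | a :: L, b :: R, h => by
    have hab : a.length = b.length := h (a, b) (by simp)
    have ih := countP_flatten_zip p L R (fun q hq => h q (by simp [hq]))
    simp [List.zip_append hab, List.countP_append, ih]

theorem sum_zip_pvM : ∀ (n : Nat) (l r : List String), l.length = n → r.length = n →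
    ((l.zip r).map (fun q => pvHam q.1 q.2)).sum
    = ((List.range n).map (fun j => pvHam (l.getD j "") (r.getD j ""))).sum
  | 0, l, r, hl, hr => by
    rw [List.length_eq_zero_iff.mp hl, List.length_eq_zero_iff.mp hr]; simp
  | n + 1, l0, r0, hl, hr => by
    match l0, r0, hl, hr with
    | [], _, hl, _ => simp at hl
    | _ :: _, [], _, hr => simp at hr
    | a :: l, b :: r, hl, hr =>
      have ih := sum_zip_pvM n l r (by simpa using hl) (by simpa using hr)
      simp [List.range_succ_eq_map, List.map_map, Function.comp_def, ih]

theorem foldl_first (p : Int → Prop) [DecidablePred p] :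
    ∀ (l : List Int) (acc : Option Int),
      l.foldl (fun a i => match a with | some _ => a | none => if p i then some i else none) acc
      = acc.or (l.find? (fun i => decide (p i)))
  | [], acc => by cases acc <;> simp
  | i :: l, acc => by
    cases acc with
    | some x => simp [foldl_first p l (some x)]
    | none =>
      by_cases h : p i
      · simp [h, foldl_first p l (some i)]
      · simp [h, foldl_first p l none]

theorem foldl_first_pairs (p : Int → Prop) [DecidablePred p] :
    ∀ (l : List (Int × String)) (acc : Option Int),
      l.foldl (fun a q => match a with | some _ => a | none => if p q.1 then some q.1 else none) acc
      = acc.or ((l.map Prod.fst).find? (fun i => decide (p i)))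
  | [], acc => by cases acc <;> simp
  | q :: l, acc => by
    cases acc with
    | some x => simp [foldl_first_pairs p l (some x)]
    | none =>
      by_cases h : p q.1
      · simp [h, foldl_first_pairs p l (some q.1)]
      · simp [h, foldl_first_pairs p l none]

theorem find?_congr' (p q : Int → Bool) :
    ∀ (l : List Int), (∀ x ∈ l, p x = q x) → l.find? p = l.find? q
  | [], _ => rfl
  | a :: l, h => by
    rw [List.find?_cons, List.find?_cons, h a List.mem_cons_self,
      find?_congr' p q l (fun x hx => h x (List.mem_cons_of_mem a hx))]

theorem findA_char (lst : List String) (ad : Int) :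
    find_reflection lst ad
    = (PySem.List.pyRange 1 (1 + (lst.length : Int)) 1).find?
        (fun i => decide (PACond lst ad i)) := by
  have h0 : find_reflection lst ad
      = (PySem.List.enumerate lst 1).foldl
          (fun a q => match a with
            | some _ => a
            | none => if PACond lst ad q.1 then some q.1 else none) none := rfl
  rw [h0, foldl_first_pairs, PySem.List.map_fst_enumerate]
  simp

theorem findB_char (rows : List String) (ad : Int) :
    find_reflection_alt rows ad
    = (PySem.List.pyRange 1 ((rows.length : Int)) 1).find?
        (fun i => decide ((diagTable rows).getD (2 * i - 1) 0 = ad)) := by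
  have h0 : find_reflection_alt rows ad
      = (PySem.List.pyRange 1 (PySem.List.len rows) 1).foldl
          (fun a i => match a with
            | some _ => a
            | none => if (diagTable rows).getD (2 * i - 1) 0 = ad then some i else none) none := rfl
  rw [h0, foldl_first]
  simp [PySem.List.len_eq]

-- A's condition characterised by the mirrored-pair sum (rectangular lst, 1 ≤ k < n)
theorem condA_iff (lst : List String) (ad : Int)
    (hrect : ∀ a ∈ lst, ∀ b ∈ lst, a.toList.length = b.toList.length)
    (k : Nat) (h1 : 1 ≤ k) (h2 : k < lst.length) :
    (PACond lst ad (k : Int) ↔ mirrorSum lst k = ad) := by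
  set N := lst.length with hN
  set mk := min k (N - k) with hmk
  have hmk1 : 1 ≤ mk := by omega
  have hmkk : mk ≤ k := by omega
  have hmkN : k + mk ≤ N := by omega
  have hm : min ((k : Int)) (PySem.List.len lst - (k : Int)) = (mk : Int) := by
    simp only [PySem.List.len_eq, ← hN]; omega
  have hleft : PySem.List.slice lst (some ((k : Int) - (mk : Int))) (some (k : Int))
      = (lst.drop (k - mk)).take mk := by
    have hc : (k : Int) - (mk : Int) = ((k - mk : Nat) : Int) := by omega
    rw [hc, PySem.List.slice_natCast]
    congr 1
    omega
  have hright : PySem.List.slice lst (some (k : Int)) (some ((k : Int) + (mk : Int)))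
      = (lst.drop k).take mk := PySem.List.slice_natCast_add lst k mk
  have hlenL : ((lst.drop (k - mk)).take mk).length = mk := by
    simp [List.length_take, List.length_drop]; omega
  have hlenR : ((lst.drop k).take mk).length = mk := by
    simp [List.length_take, List.length_drop]; omega
  have hA : ((get_differences (pvJoin ((lst.drop (k - mk)).take mk))
        (pvJoin (((lst.drop k).take mk).reverse))).length : Int)
      = ((List.range mk).map (fun t =>
          pvHam (((lst.drop (k - mk)).take mk).getD t "")
                ((((lst.drop k).take mk).reverse).getD t ""))).sum := by
    simp only [pvJoin]
    rw [gd_len]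
    rw [countP_flatten_zip _ _ _ (by
      intro q hq
      rw [List.zip_map] at hq
      obtain ⟨⟨x, y⟩, hq', rfl⟩ := List.mem_map.mp hq
      have h1 := List.of_mem_zip hq'
      have ha : x ∈ lst := List.mem_of_mem_drop (List.mem_of_mem_take h1.1)
      have hb : y ∈ lst :=
        List.mem_of_mem_drop (List.mem_of_mem_take (List.mem_reverse.mp h1.2))
      exact hrect _ ha _ hb)]
    rw [List.zip_map, List.map_map]
    rw [show ((fun q : List Char × List Char => (q.1.zip q.2).countP (fun c => c.1 != c.2)) ∘
        Prod.map String.toList String.toList)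
      = (fun q : String × String => (q.1.toList.zip q.2.toList).countP (fun c => c.1 != c.2))
      from rfl]
    rw [cast_sum_map]
    exact sum_zip_pvM mk _ _ hlenL (by simp [hlenR])
  have hsum : ((List.range mk).map (fun t =>
          pvHam (((lst.drop (k - mk)).take mk).getD t "")
                ((((lst.drop k).take mk).reverse).getD t ""))).sum
      = mirrorSum lst k := by
    have toFin : ∀ (f : Nat → Int), ((List.range mk).map f).sum = ∑ t ∈ Finset.range mk, f t :=
      fun f => rfl
    rw [mirrorSum, ← hN, ← hmk, toFin, toFin]
    rw [← Finset.sum_range_reflect]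
    apply Finset.sum_congr rfl
    intro t ht
    have ht' : t < mk := Finset.mem_range.mp ht
    have eL : ((lst.drop (k - mk)).take mk).getD (mk - 1 - t) "" = lst.getD (k - 1 - t) "" := by
      rw [List.getD_eq_getElem?_getD, List.getD_eq_getElem?_getD,
        List.getElem?_take_of_lt (by omega), List.getElem?_drop]
      have e : k - mk + (mk - 1 - t) = k - 1 - t := by omega
      rw [e]
    have eR : (((lst.drop k).take mk).reverse).getD (mk - 1 - t) "" = lst.getD (k + t) "" := by
      rw [List.getD_eq_getElem?_getD, List.getD_eq_getElem?_getD,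
        List.getElem?_reverse (by rw [hlenR]; omega), hlenR,
        List.getElem?_take_of_lt (by omega), List.getElem?_drop]
      have e : k + (mk - 1 - (mk - 1 - t)) = k + t := by omega
      rw [e]
    rw [eL, eR]
  constructor
  · rintro ⟨-, -, hcnt⟩
    rw [hm, hleft, hright] at hcnt
    rw [← hsum, ← hA]
    exact hcnt
  · intro hb
    simp only [PACond]
    rw [hm, hleft, hright]
    refine ⟨List.ne_nil_of_length_pos (by rw [hlenL]; omega),
      List.ne_nil_of_length_pos (by rw [hlenR]; omega), ?_⟩
    rw [hA, hsum]
    exact hb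

-- the dict after an accumulate-fold: old value plus the sum of increments at that key
theorem getD_foldl_acc {α : Type} (key : α → Int) (f : α → Int) :
    ∀ (l : List α) (d : PySem.Dict Int Int) (s : Int),
      (l.foldl (fun d x => d.insert (key x) (d.getD (key x) 0 + f x)) d).getD s 0
      = d.getD s 0 + (l.map (fun x => if key x = s then f x else 0)).sum
  | [], d, s => by simp
  | x :: l, d, s => by
    rw [List.foldl_cons, getD_foldl_acc key f l _ s, PySem.Dict.getD_insert,
      List.map_cons, List.sum_cons]
    by_cases h : s = key x
    · have h' : key x = s := h.symm
      rw [if_pos h, if_pos h', h]; ring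
    · have h' : ¬ key x = s := fun e => h e.symm
      rw [if_neg h, if_neg h']; ring

theorem sum_map_ite_single {g : Int → Int} :
    ∀ (l : List Int), l.Nodup → ∀ (c : Int),
      (l.map (fun b => if b = c then g b else 0)).sum = if c ∈ l then g c else 0
  | [], _, c => by simp
  | b :: l, h, c => by
    have hnd := List.nodup_cons.mp h
    rw [List.map_cons, List.sum_cons, sum_map_ite_single l hnd.2 c]
    by_cases hb : b = c
    · subst hb
      rw [if_pos rfl, if_neg (fun hc => hnd.1 hc), if_pos List.mem_cons_self]
      ring
    · rw [if_neg hb]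
      by_cases hc : c ∈ l
      · rw [if_pos hc, if_pos (List.mem_cons_of_mem b hc)]; ring
      · have hnc : c ∉ b :: l := by
          intro h'
          rcases List.mem_cons.mp h' with e | e
          · exact hb e.symm
          · exact hc e
        rw [if_neg hc, if_neg hnc]; ring

-- B's bucket at key 2k-1 is exactly the mirrored-pair sum
theorem diag_getD (lst : List String) (k : Nat) (h1 : 1 ≤ k) (h2 : k < lst.length) :
    (diagTable lst).getD (2 * (k : Int) - 1) 0 = mirrorSum lst k := by
  set N := lst.length with hN
  set mk := min k (N - k) with hmk
  have hmk1 : 1 ≤ mk := by omega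
  set s : Int := 2 * (k : Int) - 1 with hs
  set lo : Int := (k : Int) - (mk : Int) with hlo
  -- characterise the outer fold via the inner accumulate-fold
  have houter : ∀ (l : List Int) (d : PySem.Dict Int Int),
      (l.foldl (fun d a =>
        (PySem.List.pyRange (a + 1) (PySem.List.len lst) 1).foldl
          (fun d b => d.insert (a + b) ((d.getD (a + b) 0) +
            pvHam (PySem.List.pyGetD lst a "") (PySem.List.pyGetD lst b ""))) d) d).getD s 0
      = d.getD s 0 + (l.map (fun a =>
          ((PySem.List.pyRange (a + 1) (PySem.List.len lst) 1).map
            (fun b => if a + b = s then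
              pvHam (PySem.List.pyGetD lst a "") (PySem.List.pyGetD lst b "") else 0)).sum)).sum := by
    intro l
    induction l with
    | nil => intro d; simp
    | cons a l ih =>
      intro d
      rw [List.foldl_cons, ih, List.map_cons, List.sum_cons,
        getD_foldl_acc (fun b => a + b)
          (fun b => pvHam (PySem.List.pyGetD lst a "") (PySem.List.pyGetD lst b "")) _ d s]
      ring
  have hd0 : diagTable lst
      = (PySem.List.pyRange 0 (PySem.List.len lst) 1).foldl
          (fun d a =>
            (PySem.List.pyRange (a + 1) (PySem.List.len lst) 1).foldl
              (fun d b => d.insert (a + b) ((d.getD (a + b) 0) +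
                pvHam (PySem.List.pyGetD lst a "") (PySem.List.pyGetD lst b ""))) d)
          PySem.Dict.empty := rfl
  rw [hd0, houter, PySem.Dict.getD_empty, zero_add]
  -- collapse each inner sum to a single term
  have hinner : ∀ a : Int,
      ((PySem.List.pyRange (a + 1) (PySem.List.len lst) 1).map
        (fun b => if a + b = s then
          pvHam (PySem.List.pyGetD lst a "") (PySem.List.pyGetD lst b "") else 0)).sum
      = if (s - a) ∈ PySem.List.pyRange (a + 1) (PySem.List.len lst) 1 then
          pvHam (PySem.List.pyGetD lst a "") (PySem.List.pyGetD lst (s - a) "") else 0 := by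
    intro a
    have hfun : (fun b : Int => if a + b = s then
          pvHam (PySem.List.pyGetD lst a "") (PySem.List.pyGetD lst b "") else 0)
        = (fun b : Int => if b = s - a then
          pvHam (PySem.List.pyGetD lst a "") (PySem.List.pyGetD lst b "") else 0) := by
      funext b
      by_cases hb : b = s - a
      · rw [if_pos hb, if_pos (by omega)]
      · rw [if_neg hb, if_neg (by omega)]
    rw [hfun]
    exact sum_map_ite_single _ (PySem.List.nodup_pyRange_one _ _) _
  simp only [hinner]
  -- split the outer range at lo and k
  have hsplit : PySem.List.pyRange 0 (PySem.List.len lst) 1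
      = (PySem.List.pyRange 0 lo 1 ++ PySem.List.pyRange lo (k : Int) 1)
        ++ PySem.List.pyRange (k : Int) (PySem.List.len lst) 1 := by
    rw [← PySem.List.pyRange_one_append 0 lo (k : Int) (by omega) (by omega),
      ← PySem.List.pyRange_one_append 0 (k : Int) (PySem.List.len lst)
        (by omega) (by simp [PySem.List.len_eq, ← hN]; omega)]
  rw [hsplit, List.map_append, List.map_append, List.sum_append, List.sum_append]
  have hzero1 : ((PySem.List.pyRange 0 lo 1).map (fun a =>
      if (s - a) ∈ PySem.List.pyRange (a + 1) (PySem.List.len lst) 1 then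
        pvHam (PySem.List.pyGetD lst a "") (PySem.List.pyGetD lst (s - a) "") else 0)).sum = 0 := by
    rw [List.sum_eq_zero]
    intro x hx
    obtain ⟨a, ha, rfl⟩ := List.mem_map.mp hx
    have hab := PySem.List.mem_pyRange_one.mp ha
    rw [if_neg]
    intro hmem
    have hb := PySem.List.mem_pyRange_one.mp hmem
    simp only [PySem.List.len_eq, ← hN] at hb
    omega
  have hzero2 : ((PySem.List.pyRange (k : Int) (PySem.List.len lst) 1).map (fun a =>
      if (s - a) ∈ PySem.List.pyRange (a + 1) (PySem.List.len lst) 1 then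
        pvHam (PySem.List.pyGetD lst a "") (PySem.List.pyGetD lst (s - a) "") else 0)).sum = 0 := by
    rw [List.sum_eq_zero]
    intro x hx
    obtain ⟨a, ha, rfl⟩ := List.mem_map.mp hx
    have hab := PySem.List.mem_pyRange_one.mp ha
    rw [if_neg]
    intro hmem
    have hb := PySem.List.mem_pyRange_one.mp hmem
    omega
  rw [hzero1, hzero2, zero_add, add_zero]
  -- the middle range: every a contributes; reindex to the mirrored j-sum
  have hmid : ∀ a ∈ PySem.List.pyRange lo (k : Int) 1,
      (if (s - a) ∈ PySem.List.pyRange (a + 1) (PySem.List.len lst) 1 then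
        pvHam (PySem.List.pyGetD lst a "") (PySem.List.pyGetD lst (s - a) "") else 0)
      = pvHam (PySem.List.pyGetD lst a "") (PySem.List.pyGetD lst (s - a) "") := by
    intro a ha
    have hab := PySem.List.mem_pyRange_one.mp ha
    rw [if_pos]
    apply PySem.List.mem_pyRange_one.mpr
    simp only [PySem.List.len_eq, ← hN]
    omega
  rw [List.map_congr_left hmid]
  have hrange : PySem.List.pyRange lo (k : Int) 1
      = (List.range mk).map (fun t : Nat => lo + (t : Int)) := by
    have e : ((k : Int) - lo).toNat = mk := by omega
    rw [PySem.List.pyRange_one, e]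
  rw [hrange, List.map_map]
  have toFin : ∀ (f : Nat → Int), ((List.range mk).map f).sum = ∑ t ∈ Finset.range mk, f t :=
    fun f => rfl
  rw [mirrorSum, ← hN, ← hmk, toFin, toFin]
  rw [← Finset.sum_range_reflect]
  apply Finset.sum_congr rfl
  intro j hj
  have hj' : j < mk := Finset.mem_range.mp hj
  have e1 : lo + ((mk - 1 - j : Nat) : Int) = ((k - 1 - j : Nat) : Int) := by omega
  have e2 : s - ((k - 1 - j : Nat) : Int) = ((k + j : Nat) : Int) := by omega
  simp only [Function.comp_def]
  rw [e1, e2, PySem.List.pyGetD_natCast, PySem.List.pyGetD_natCast]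

theorem condA_last (lst : List String) (ad : Int) (h : 1 ≤ lst.length) :
    ¬ PACond lst ad (lst.length : Int) := by
  rintro ⟨-, hr, -⟩
  apply hr
  have hm : min ((lst.length : Int)) (PySem.List.len lst - (lst.length : Int)) = ((0 : Nat) : Int) := by
    simp only [PySem.List.len_eq]; omega
  rw [hm]
  have : ((lst.length : Int)) + ((0 : Nat) : Int) = (lst.length : Int) := by omega
  rw [this, PySem.List.slice_natCast]
  simp

theorem find_reflection_eq (lst : List String) (ad : Int)
    (hrect : ∀ a ∈ lst, ∀ b ∈ lst, a.toList.length = b.toList.length) :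
    find_reflection lst ad = find_reflection_alt lst ad := by
  rw [findA_char, findB_char]
  rcases Nat.eq_zero_or_pos lst.length with h0 | hpos
  · rw [h0]
    rw [PySem.List.pyRange_one_eq_nil (by omega), PySem.List.pyRange_one_eq_nil (by omega)]
    rfl
  · rw [PySem.List.pyRange_one_append 1 (lst.length : Int) (1 + (lst.length : Int)) (by omega) (by omega),
      List.find?_append]
    have hlast : (PySem.List.pyRange ((lst.length : Int)) (1 + (lst.length : Int)) 1).find?
        (fun i => decide (PACond lst ad i)) = none := by
      have : PySem.List.pyRange ((lst.length : Int)) (1 + (lst.length : Int)) 1 = [(lst.length : Int)] := by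
        have e : (1 : Int) + (lst.length : Int) = (lst.length : Int) + 1 := by omega
        rw [e, PySem.List.pyRange_one_singleton]
      rw [this]
      simp [List.find?, condA_last lst ad hpos]
    rw [hlast, Option.or_none]
    apply find?_congr'
    intro x hx
    have hmem := (PySem.List.mem_pyRange_one).mp hx
    obtain ⟨k, rfl⟩ : ∃ k : Nat, x = (k : Int) := ⟨x.toNat, by omega⟩
    have hk1 : 1 ≤ k := by exact_mod_cast hmem.1
    have hk2 : k < lst.length := by exact_mod_cast hmem.2
    apply decide_eq_decide.mpr
    rw [condA_iff lst ad hrect k hk1 hk2, diag_getD lst k hk1 hk2]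

theorem columns_rect (mirror : List String) :
    ∀ a ∈ (PySem.List.pyRange 0 (PySem.List.len (mirror.headD "").toList) 1).map
        (fun i => String.ofList (mirror.map (fun line => PySem.List.pyGetD line.toList i ' '))),
      ∀ b ∈ (PySem.List.pyRange 0 (PySem.List.len (mirror.headD "").toList) 1).map
        (fun i => String.ofList (mirror.map (fun line => PySem.List.pyGetD line.toList i ' '))),
        a.toList.length = b.toList.length := by
  intro a ha b hb
  obtain ⟨i, -, rfl⟩ := List.mem_map.mp ha
  obtain ⟨j, -, rfl⟩ := List.mem_map.mp hb
  simp

-- ===== VERDICT (by name: the statement is the Claim_ definition above) =====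
theorem solve_spec : Claim_equal_solve := by
  intro mirrors ad _hdom hpre
  show solve mirrors ad = solve_alt mirrors ad
  unfold solve solve_alt
  apply PySem.List.foldl_congr_mem
  intro acc mirror hmem
  have hrect := (hpre mirror hmem).2
  simp only [find_reflection_eq mirror ad hrect,
    find_reflection_eq _ ad (columns_rect mirror)]
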